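-- pv_equiv track=rewrite | github.com/tizilemes03/guiaspedorras | simulacroParcial.py | contar_traducciones_iguales
-- ===== SOURCE A (Python) =====
-- def contar_traducciones_iguales(ing:dict,ale:dict)->int:
--     listIng=[]
--     listAle=[]
--     for i in ing:
--         listIng.append((i,ing[i]))
--     for a in ale:
--         listAle.append((a,ale[a]))
--
--     resultado = compara_listas(listIng,listAle)
--     return resultado
--
-- def compara_listas(list:[str],list2:[list])->int:
--     res=0
--     for e in list:
--         if e in list2:           #O USAR EL IN PELOTUDO, (actualizacion): fue usado equisde
--             res += 1
--     return res
-- ===== SOURCE B (Python) =====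
-- def contar_traducciones_iguales(ing: dict, ale: dict) -> int:
--     xs = sorted(ing.items(), key=lambda kv: kv[0])
--     ys = sorted(ale.items(), key=lambda kv: kv[0])
--     i = j = res = 0
--     while i < len(xs) and j < len(ys):
--         (kx, vx), (ky, vy) = xs[i], ys[j]
--         if kx < ky:
--             i += 1
--         elif ky < kx:
--             j += 1
--         else:
--             if vx == vy:
--                 res += 1
--             i += 1
--             j += 1
--     return res
-- ===== Notes on version B (the rewrite author's own statement) =====
-- stated objective: faster
-- what changed: Replaces A's three loops (materialise both item lists, nested linear membership scan) with sort-both-by-key followed by a two-pointer merge scan that counts key-value matches.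
import Mathlib
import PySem

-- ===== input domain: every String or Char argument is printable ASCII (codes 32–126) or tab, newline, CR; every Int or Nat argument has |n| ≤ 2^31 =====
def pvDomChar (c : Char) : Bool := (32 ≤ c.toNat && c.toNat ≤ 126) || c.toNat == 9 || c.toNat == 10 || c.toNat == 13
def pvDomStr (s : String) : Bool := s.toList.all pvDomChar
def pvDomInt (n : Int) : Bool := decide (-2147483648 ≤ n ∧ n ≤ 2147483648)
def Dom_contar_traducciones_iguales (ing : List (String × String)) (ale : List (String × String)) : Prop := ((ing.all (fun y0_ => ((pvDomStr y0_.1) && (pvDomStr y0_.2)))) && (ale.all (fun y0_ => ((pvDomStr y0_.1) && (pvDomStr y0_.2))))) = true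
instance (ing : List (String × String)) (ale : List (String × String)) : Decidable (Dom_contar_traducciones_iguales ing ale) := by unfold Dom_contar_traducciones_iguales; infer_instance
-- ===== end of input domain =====

-- B replaces A's three loops (build both item lists, nested linear membership scan) with
-- sort-both-by-key plus a two-pointer merge scan; objective: faster (sort+merge vs nested scan).

-- ===== PORT A =====
-- compara_listas: count elements of l that are members of l2
def compara_listas (l : List (String × String)) (l2 : List (String × String)) : Int :=
  l.foldl (fun res e => if l2.contains e then res + 1 else res) 0

def contar_traducciones_iguales (ing : List (String × String)) (ale : List (String × String)) : Int :=
  let ding := PySem.Dict.mk ing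
  let dale := PySem.Dict.mk ale
  -- for i in ing: listIng.append((i, ing[i]))   (i ranges over the dict's keys; ing[i] never raises)
  let listIng := ding.keys.foldl (fun acc i => acc ++ [(i, ding.getD i "")]) []
  let listAle := dale.keys.foldl (fun acc a => acc ++ [(a, dale.getD a "")]) []
  compara_listas listIng listAle

-- ===== PORT B =====
-- the while loop: the two indices advance by dropping the head of the remaining suffix
def mergeLoop : List (String × String) → List (String × String) → Int → Int
  | (kx, vx) :: xs, (ky, vy) :: ys, res =>
      if kx < ky then mergeLoop xs ((ky, vy) :: ys) res
      else if ky < kx then mergeLoop ((kx, vx) :: xs) ys res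
      else mergeLoop xs ys (if vx == vy then res + 1 else res)
  | _, _, res => res
termination_by xs ys _ => xs.length + ys.length

def contar_traducciones_iguales_alt (ing : List (String × String)) (ale : List (String × String)) : Int :=
  let xs := PySem.List.sorted (PySem.Dict.mk ing).items Prod.fst false
  let ys := PySem.List.sorted (PySem.Dict.mk ale).items Prod.fst false
  mergeLoop xs ys 0

-- ===== PRECONDITION & SPEC =====
-- Pre_ excludes association lists with duplicate keys: those do not represent any Python dict
-- (a Python dict literal collapses duplicates), so A's behaviour on them is accidental; B does the natural thing there.
def Pre_contar_traducciones_iguales (ing : List (String × String)) (ale : List (String × String)) : Prop :=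
  (ing.map Prod.fst).Nodup ∧ (ale.map Prod.fst).Nodup
instance (ing : List (String × String)) (ale : List (String × String)) : Decidable (Pre_contar_traducciones_iguales ing ale) := by unfold Pre_contar_traducciones_iguales; infer_instance

def pvWitness_contar_traducciones_iguales : (List (String × String)) × (List (String × String)) :=
  ([("cat", "gato"), ("dog", "perro")], [("cat", "gato"), ("dog", "hund")])

def Spec_contar_traducciones_iguales (ing : List (String × String)) (ale : List (String × String)) (out : Int) : Prop := out = contar_traducciones_iguales_alt ing ale
instance (ing : List (String × String)) (ale : List (String × String)) (out : Int) : Decidable (Spec_contar_traducciones_iguales ing ale out) := by unfold Spec_contar_traducciones_iguales; infer_instance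

-- ===== CLAIM (what is proved, stated in full; the proofs are below) =====
def Claim_equal_contar_traducciones_iguales : Prop := ∀ (ing : List (String × String)) (ale : List (String × String)), Dom_contar_traducciones_iguales ing ale → Pre_contar_traducciones_iguales ing ale → Spec_contar_traducciones_iguales ing ale (contar_traducciones_iguales ing ale)

-- ===== LEMMAS AND PROOFS =====

-- With distinct keys, rebuilding (key, value) pairs by lookup reproduces the association list itself.
lemma rebuild_eq_self (l : List (String × String)) (h : (l.map Prod.fst).Nodup) :
    (PySem.Dict.mk l).keys.map (fun k => (k, (PySem.Dict.mk l).getD k "")) = l := by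
  have hk : (PySem.Dict.mk l).keys = l.map Prod.fst := by simp [PySem.Dict.keys]
  rw [hk, List.map_map]
  have : ∀ p ∈ l, ((fun k => (k, (PySem.Dict.mk l).getD k "")) ∘ Prod.fst) p = p := by
    intro p hp
    have hmem : (p.1, p.2) ∈ (PySem.Dict.mk l).items := by simpa [PySem.Dict.items] using hp
    have hnd : (PySem.Dict.mk l).keys.Nodup := by
      simpa [PySem.Dict.keys, PySem.Dict.items] using h
    simp [PySem.Dict.getD_of_mem_items _ hmem hnd ""]
  calc l.map ((fun k => (k, (PySem.Dict.mk l).getD k "")) ∘ Prod.fst)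
      = l.map id := List.map_congr_left this
    _ = l := List.map_id l

-- key-strictly-sorted lists: the merge scan counts exactly the pairs of xs that occur in ys
lemma mergeLoop_eq_countP (xs ys : List (String × String)) (res : Int)
    (hx : xs.Pairwise (fun a b => a.1 < b.1)) (hy : ys.Pairwise (fun a b => a.1 < b.1)) :
    mergeLoop xs ys res = res + (xs.countP (fun e => ys.contains e) : Int) := by
  induction xs, ys, res using mergeLoop.induct with
  | case1 kx vx xs ky vy ys res h1 ih =>
      rw [mergeLoop]
      simp only [if_pos h1]
      rw [ih (List.Pairwise.of_cons hx) hy]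
      have hnys : (kx, vx) ∉ ys := by
        intro hm
        exact absurd h1 (not_lt.mpr (le_of_lt (List.rel_of_pairwise_cons hy hm)))
      have hk : kx ≠ ky := ne_of_lt h1
      simp only [List.countP_cons]
      have hhead : (((ky, vy) :: ys).contains (kx, vx)) = false := by
        simp only [List.contains_cons, Bool.or_eq_false_iff]
        constructor
        · simp only [beq_eq_false_iff_ne, ne_eq, Prod.mk.injEq, not_and]
          intro he; exact absurd he hk
        · simp only [List.contains_eq_any_beq, List.any_eq_false]
          intro p hp hb
          exact hnys ((beq_iff_eq.mp hb) ▸ hp)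
      rw [hhead]
      simp
  | case2 kx vx xs ky vy ys res h1 h2 ih =>
      rw [mergeLoop]
      simp only [if_neg h1, if_pos h2]
      rw [ih hx (List.Pairwise.of_cons hy)]
      have hcongr : ((kx, vx) :: xs).countP (fun e => (((ky, vy) :: ys).contains e)) =
          ((kx, vx) :: xs).countP (fun e => (ys.contains e)) := by
        apply List.countP_congr
        intro p hp
        have hgt : ky < p.1 := by
          rcases List.mem_cons.mp hp with h | h
          · rw [h]; exact h2
          · exact lt_trans h2 (List.rel_of_pairwise_cons hx h)
        have hne : p ≠ (ky, vy) := by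
          intro he; rw [he] at hgt; exact lt_irrefl _ hgt
        simp [hne]
      rw [hcongr]
  | case3 kx vx xs ky vy ys res h1 h2 ih =>
      have hkeq : kx = ky := le_antisymm (le_of_not_gt h2) (le_of_not_gt h1)
      rw [mergeLoop]
      simp only [if_neg h1, if_neg h2]
      -- tail of xs never matches (ky, vy): its keys are > kx = ky
      have htail : xs.countP (fun e => (((ky, vy) :: ys).contains e)) =
          xs.countP (fun e => (ys.contains e)) := by
        apply List.countP_congr
        intro p hp
        have hgt : ky < p.1 := hkeq ▸ List.rel_of_pairwise_cons hx hp
        have hne : p ≠ (ky, vy) := by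
          intro he; rw [he] at hgt; exact lt_irrefl _ hgt
        simp [hne]
      have hih := ih (List.Pairwise.of_cons hx) (List.Pairwise.of_cons hy)
      by_cases hv : vx = vy
      · subst hv
        simp only [beq_self_eq_true, if_true, dite_eq_ite] at hih ⊢
        rw [hih]
        have hhead : (((ky, vx) :: ys).contains (kx, vx)) = true := by
          simp [hkeq]
        simp only [List.countP_cons, htail, hhead]
        push_cast
        ring
      · have hbv : (vx == vy) = false := beq_eq_false_iff_ne.mpr hv
        simp only [hbv, if_false, dite_eq_ite, Bool.false_eq_true] at hih ⊢
        rw [hih]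
        have h2m : (kx, vx) ∉ ys := by
          intro hm
          have := List.rel_of_pairwise_cons hy hm
          rw [hkeq] at this; exact lt_irrefl _ this
        have hhead : (((ky, vy) :: ys).contains (kx, vx)) = false := by
          simp only [List.contains_cons, Bool.or_eq_false_iff]
          refine ⟨by simp [Prod.ext_iff, hv], ?_⟩
          simp only [List.contains_eq_any_beq, List.any_eq_false]
          intro p hp hb
          exact h2m ((beq_iff_eq.mp hb) ▸ hp)
        simp only [List.countP_cons, htail, hhead]
        simp
  | case4 xs ys res h =>
      cases xs with
      | nil => simp [mergeLoop]
      | cons x xs' =>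
        cases ys with
        | nil =>
          obtain ⟨kx, vx⟩ := x
          simp [mergeLoop]
        | cons y ys' =>
          obtain ⟨kx, vx⟩ := x
          obtain ⟨ky, vy⟩ := y
          exact absurd (h kx vx xs' ky vy ys' rfl rfl) not_false

-- strict pairwise on the sorted items, from sortedness (≤ on keys) + nodup keys
lemma sorted_pairwise_strict (l : List (String × String)) (h : (l.map Prod.fst).Nodup) :
    (PySem.List.sorted l Prod.fst false).Pairwise (fun a b => a.1 < b.1) := by
  have hle : (PySem.List.sorted l Prod.fst false).Pairwise (fun a b => a.1 ≤ b.1) :=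
    PySem.List.sorted_pairwise l Prod.fst
  have hperm : (PySem.List.sorted l Prod.fst false).Perm l := PySem.List.sorted_perm l Prod.fst false
  have hnd : ((PySem.List.sorted l Prod.fst false).map Prod.fst).Nodup :=
    (hperm.map Prod.fst).nodup_iff.mpr h
  have hne : (PySem.List.sorted l Prod.fst false).Pairwise (fun a b => a.1 ≠ b.1) :=
    (List.pairwise_map).mp hnd
  exact (hle.and hne).imp (fun ⟨h1, h2⟩ => lt_of_le_of_ne h1 h2)

-- ===== VERDICT (by name: the statement is the Claim_ definition above) =====
theorem contar_traducciones_iguales_spec : Claim_equal_contar_traducciones_iguales := by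
  intro ing ale _hdom ⟨h1, h2⟩
  unfold Spec_contar_traducciones_iguales contar_traducciones_iguales contar_traducciones_iguales_alt compara_listas
  simp only [PySem.List.foldl_append_singleton_eq_map, List.nil_append,
    rebuild_eq_self ing h1, rebuild_eq_self ale h2]
  rw [PySem.List.foldl_if_add_one]
  rw [mergeLoop_eq_countP _ _ _ (sorted_pairwise_strict ing h1) (sorted_pairwise_strict ale h2)]
  have hpermI := PySem.List.sorted_perm ing (Prod.fst (α := String) (β := String)) false
  have hpermA := PySem.List.sorted_perm ale (Prod.fst (α := String) (β := String)) false
  have hc : (PySem.List.sorted ing Prod.fst false).countP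
        (fun e => ((PySem.List.sorted ale Prod.fst false).contains e)) =
      ing.countP (fun e => (ale.contains e)) := by
    rw [hpermI.countP_eq]
    apply List.countP_congr
    intro p _
    simp only [List.contains_iff_mem]
    exact ⟨fun h => hpermA.mem_iff.mp h, fun h => hpermA.mem_iff.mpr h⟩
  rw [hc]
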